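-- pv_equiv track=rewrite | github.com/FlyingCheeseDemon/AdventOfCode24 | 15b.py | check_push_horizontally
-- ===== SOURCE A (Python) =====
-- warehouse = []
--
-- def array_add(arr1,arr2):
--     output = [0] * len(arr1)
--     for i in range(len(arr1)):
--         output[i] = arr1[i] + arr2[i]
--     return output
--
-- def check_push_horizontally(warehouse,push_start,direction):
--     test_next = array_add(array_add(push_start,direction),direction)
--     value = warehouse[test_next[0]][test_next[1]]
--     if value == "#":
--         return False
--     elif value == ".":
--         return True
--     elif value in ["[","]"]:
--         return check_push_horizontally(warehouse,test_next,direction)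
-- ===== SOURCE B (Python) =====
-- def check_push_horizontally(warehouse, push_start, direction):
--     k = 1
--     while True:
--         v = warehouse[push_start[0] + 2 * k * direction[0]][push_start[1] + 2 * k * direction[1]]
--         if v == "#":
--             return False
--         if v == ".":
--             return True
--         if v != "[" and v != "]":
--             return None
--         k += 1
-- ===== Notes on version B (the rewrite author's own statement) =====
-- stated objective: simpler
-- what changed: A recurses, rebuilding the whole position vector with two array_add calls per step; B is a flat non-recursive loop over a step counter k that indexes the grid directly at the closed-form offsets start + 2*k*direction, with no helper and no intermediate lists. Pre_ excludes exactly the inputs on which A raises: too-short vectors, and box chains that never reach a deciding cell.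
import Mathlib
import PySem

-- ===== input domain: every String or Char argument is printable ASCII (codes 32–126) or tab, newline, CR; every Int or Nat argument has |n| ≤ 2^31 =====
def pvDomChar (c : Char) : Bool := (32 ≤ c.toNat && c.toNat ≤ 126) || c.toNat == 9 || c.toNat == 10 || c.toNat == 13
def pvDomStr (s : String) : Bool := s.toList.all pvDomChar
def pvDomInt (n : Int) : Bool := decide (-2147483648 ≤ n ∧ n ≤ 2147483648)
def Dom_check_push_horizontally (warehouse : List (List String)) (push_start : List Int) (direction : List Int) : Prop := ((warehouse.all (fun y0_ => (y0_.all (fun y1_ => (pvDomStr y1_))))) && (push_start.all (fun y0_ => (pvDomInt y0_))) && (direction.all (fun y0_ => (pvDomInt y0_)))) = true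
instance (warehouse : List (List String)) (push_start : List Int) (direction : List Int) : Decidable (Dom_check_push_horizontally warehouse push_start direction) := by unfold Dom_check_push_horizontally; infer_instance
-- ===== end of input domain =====

-- B replaces A's recursion — which rebuilds the whole position vector with array_add twice per
-- step — by a flat loop over a step counter k that indexes the grid at closed-form offsets
-- start + 2*k*direction; no helper, no recursion, no intermediate lists.

-- ===== PORT A =====
-- 'output = [0]*len(arr1); for i in range(len(arr1)): output[i] = arr1[i]+arr2[i]' as index recursion
def array_add_go (arr1 arr2 out : List Int) (i : Nat) : Option (List Int) :=
  if _h : i < arr1.length then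
    match PySem.List.pyGet? arr1 (i : Int), PySem.List.pyGet? arr2 (i : Int) with
    | some a, some b => array_add_go arr1 arr2 (out.set i (a + b)) (i + 1)
    | _, _ => none   -- IndexError in the loop body
  else some out
termination_by arr1.length - i

def array_add (arr1 arr2 : List Int) : Option (List Int) :=
  array_add_go arr1 arr2 (List.replicate arr1.length 0) 0

-- the recursion of A, with a fuel guard that only makes it total (inside Pre_, wherever the
-- Python A returns normally, the fuel never runs out)
def check_push_go (warehouse : List (List String)) (direction : List Int) : Nat → List Int → Option Bool
  | 0, _ => none
  | fuel + 1, push_start =>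
    match array_add push_start direction with
    | none => none
    | some t =>
      match array_add t direction with
      | none => none
      | some test_next =>
        match (PySem.List.pyGet? test_next 0).bind (fun i => PySem.List.pyGet? warehouse i) with
        | none => none   -- IndexError
        | some row =>
          match (PySem.List.pyGet? test_next 1).bind (fun j => PySem.List.pyGet? row j) with
          | none => none   -- IndexError
          | some value =>
            if value = "#" then some false
            else if value = "." then some true
            else if value = "[" ∨ value = "]" then
              check_push_go warehouse direction fuel test_next
            else none   -- Python falls through: returns None

def check_push_horizontally (warehouse : List (List String)) (push_start : List Int) (direction : List Int) : Option Bool :=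
  check_push_go warehouse direction ((warehouse.map List.length).sum + warehouse.length + 2) push_start

-- ===== PORT B =====
-- B's 'while True' loop over the counter k, with the same kind of fuel guard
def check_push_alt_go (warehouse : List (List String)) (r0 c0 dr dc : Int) : Nat → Int → Option Bool
  | 0, _ => none
  | fuel + 1, k =>
    match PySem.List.pyGet? warehouse (r0 + 2 * k * dr) with
    | none => none   -- IndexError
    | some row =>
      match PySem.List.pyGet? row (c0 + 2 * k * dc) with
      | none => none   -- IndexError
      | some v =>
        if v = "#" then some false
        else if v = "." then some true
        else if v ≠ "[" ∧ v ≠ "]" then none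
        else check_push_alt_go warehouse r0 c0 dr dc fuel (k + 1)

def check_push_horizontally_alt (warehouse : List (List String)) (push_start : List Int) (direction : List Int) : Option Bool :=
  match PySem.List.pyGet? push_start 0, PySem.List.pyGet? push_start 1,
        PySem.List.pyGet? direction 0, PySem.List.pyGet? direction 1 with
  | some r0, some c0, some dr, some dc =>
      check_push_alt_go warehouse r0 c0 dr dc ((warehouse.map List.length).sum + warehouse.length + 2) 1
  | _, _, _, _ => none

-- ===== PRECONDITION & SPEC =====
-- the grid cell probed at the k-th step of the scan (Python index semantics, none = out of range)
def pvProbe (warehouse : List (List String)) (push_start : List Int) (direction : List Int) (k : Nat) : Option String :=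
  (PySem.List.pyGet? warehouse (push_start.getD 0 0 + 2 * (k : Int) * direction.getD 0 0)).bind
    (fun row => PySem.List.pyGet? row (push_start.getD 1 0 + 2 * (k : Int) * direction.getD 1 0))

def pvDecisive (warehouse : List (List String)) (push_start : List Int) (direction : List Int) (k : Nat) : Bool :=
  match pvProbe warehouse push_start direction k with
  | some v => !(v == "[") && !(v == "]")
  | none => false

def pvBox (warehouse : List (List String)) (push_start : List Int) (direction : List Int) (k : Nat) : Bool :=
  match pvProbe warehouse push_start direction k with
  | some v => v == "[" || v == "]"
  | none => false

-- Pre_ excludes exactly the inputs on which A raises: position/direction vectors too short for A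
-- (IndexError in array_add or on test_next, B raises too), and scans whose box chain never reaches
-- a deciding cell (A raises IndexError running off the grid, or RecursionError when the all-zero
-- direction pins the scan on a box).
def Pre_check_push_horizontally (warehouse : List (List String)) (push_start : List Int) (direction : List Int) : Prop :=
  2 ≤ push_start.length ∧ push_start.length ≤ direction.length ∧
  ∃ k ∈ Finset.Icc 1 ((warehouse.map List.length).sum + warehouse.length + 2),
    pvDecisive warehouse push_start direction k = true ∧
    ∀ m ∈ Finset.Icc 1 (k - 1), pvBox warehouse push_start direction m = true

instance (warehouse : List (List String)) (push_start : List Int) (direction : List Int) : Decidable (Pre_check_push_horizontally warehouse push_start direction) := by unfold Pre_check_push_horizontally; infer_instance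

def pvWitness_check_push_horizontally : List (List String) × List Int × List Int :=
  ([["#", "#", "[", "]", ".", "#", "#"]], [0, 2], [0, 1])

def Spec_check_push_horizontally (warehouse : List (List String)) (push_start : List Int) (direction : List Int) (out : Option Bool) : Prop := out = check_push_horizontally_alt warehouse push_start direction
instance (warehouse : List (List String)) (push_start : List Int) (direction : List Int) (out : Option Bool) : Decidable (Spec_check_push_horizontally warehouse push_start direction out) := by unfold Spec_check_push_horizontally; infer_instance

-- ===== CLAIM (what is proved, stated in full; the proofs are below) =====
def Claim_equal_check_push_horizontally : Prop := ∀ (warehouse : List (List String)) (push_start : List Int) (direction : List Int), Dom_check_push_horizontally warehouse push_start direction → Pre_check_push_horizontally warehouse push_start direction → Spec_check_push_horizontally warehouse push_start direction (check_push_horizontally warehouse push_start direction)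

-- ===== LEMMAS AND PROOFS =====

lemma array_add_go_eq (arr1 arr2 : List Int) (h : arr1.length ≤ arr2.length) :
    ∀ (n i : Nat) (out : List Int), arr1.length - i ≤ n → out.length = arr1.length →
      array_add_go arr1 arr2 out i = some (out.take i ++ (List.zipWith (· + ·) arr1 arr2).drop i) := by
  intro n
  induction n with
  | zero =>
    intro i out hn hlen
    rw [array_add_go, dif_neg (by omega)]
    rw [List.take_of_length_le (by omega), List.drop_of_length_le (by simp; omega)]
    simp
  | succ n ih =>
    intro i out hn hlen
    by_cases hi : i < arr1.length
    · rw [array_add_go, dif_pos hi]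
      rw [PySem.List.pyGet?_natCast, PySem.List.pyGet?_natCast]
      rw [List.getElem?_eq_getElem hi, List.getElem?_eq_getElem (by omega)]
      simp only []
      rw [ih (i+1) _ (by omega) (by simpa using hlen)]
      congr 1
      have hz : i < (List.zipWith (· + ·) arr1 arr2).length := by simp; omega
      have hdrop : (List.zipWith (· + ·) arr1 arr2).drop i
          = (arr1[i] + arr2[i]) :: (List.zipWith (· + ·) arr1 arr2).drop (i+1) := by
        rw [List.drop_eq_getElem_cons hz]
        simp [List.getElem_zipWith]
      rw [hdrop]
      have hio : i < out.length := by omega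
      rw [List.set_eq_take_cons_drop (arr1[i] + arr2[i]) hio]
      rw [show i + 1 = (List.take i out).length + 1 by simp [Nat.min_eq_left (Nat.le_of_lt hio)]]
      rw [List.take_append]
      simp
    · rw [array_add_go, dif_neg hi]
      rw [List.take_of_length_le (by omega), List.drop_of_length_le (by simp; omega)]
      simp

lemma array_add_eq (arr1 arr2 : List Int) (h : arr1.length ≤ arr2.length) :
    array_add arr1 arr2 = some (List.zipWith (· + ·) arr1 arr2) := by
  rw [array_add, array_add_go_eq arr1 arr2 h arr1.length 0 _ (by omega) (by simp)]
  simp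

-- lockstep: A's recursion at its k-th rebuilt position vector computes exactly B's k-th iteration
lemma go_eq (warehouse : List (List String)) (direction : List Int) (r0 c0 dr dc : Int)
    (hd0 : PySem.List.pyGet? direction 0 = some dr)
    (hd1 : PySem.List.pyGet? direction 1 = some dc) :
    ∀ (fuel : Nat) (k : Int) (ps : List Int),
      2 ≤ ps.length → ps.length ≤ direction.length →
      PySem.List.pyGet? ps 0 = some (r0 + 2 * (k - 1) * dr) →
      PySem.List.pyGet? ps 1 = some (c0 + 2 * (k - 1) * dc) →
      check_push_go warehouse direction fuel ps = check_push_alt_go warehouse r0 c0 dr dc fuel k := by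
  intro fuel
  induction fuel with
  | zero => intro k ps _ _ _ _; rfl
  | succ fuel ih =>
    intro k ps h2 hlen hps0 hps1
    have hdl2 : 2 ≤ direction.length := le_trans h2 hlen
    have e0 : direction[0]'(by omega) = dr := by
      rw [show (0 : Int) = ((0 : Nat) : Int) from rfl,
        PySem.List.pyGet?_ofNat direction 0 (by omega)] at hd0
      exact Option.some.inj hd0
    have e1 : direction[1]'(by omega) = dc := by
      rw [show (1 : Int) = ((1 : Nat) : Int) from rfl,
        PySem.List.pyGet?_ofNat direction 1 (by omega)] at hd1
      exact Option.some.inj hd1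
    have p0 : ps[0]'(by omega) = r0 + 2 * (k - 1) * dr := by
      rw [show (0 : Int) = ((0 : Nat) : Int) from rfl,
        PySem.List.pyGet?_ofNat ps 0 (by omega)] at hps0
      exact Option.some.inj hps0
    have p1 : ps[1]'(by omega) = c0 + 2 * (k - 1) * dc := by
      rw [show (1 : Int) = ((1 : Nat) : Int) from rfl,
        PySem.List.pyGet?_ofNat ps 1 (by omega)] at hps1
      exact Option.some.inj hps1
    have ht := array_add_eq ps direction hlen
    have htl : (List.zipWith (· + ·) ps direction).length = ps.length := by
      simp [List.length_zipWith]; omega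
    have htn := array_add_eq (List.zipWith (· + ·) ps direction) direction (by omega)
    have htnl : (List.zipWith (· + ·) (List.zipWith (· + ·) ps direction) direction).length = ps.length := by
      simp [List.length_zipWith]; omega
    have tn0 : PySem.List.pyGet? (List.zipWith (· + ·) (List.zipWith (· + ·) ps direction) direction) 0 = some (r0 + 2 * k * dr) := by
      rw [show (0 : Int) = ((0 : Nat) : Int) from rfl,
        PySem.List.pyGet?_ofNat _ 0 (by omega)]
      simp [List.getElem_zipWith, p0, e0]
      ring
    have tn1 : PySem.List.pyGet? (List.zipWith (· + ·) (List.zipWith (· + ·) ps direction) direction) 1 = some (c0 + 2 * k * dc) := by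
      rw [show (1 : Int) = ((1 : Nat) : Int) from rfl,
        PySem.List.pyGet?_ofNat _ 1 (by omega)]
      simp [List.getElem_zipWith, p1, e1]
      ring
    rw [check_push_go, check_push_alt_go]
    simp only [ht]
    simp only [htn]
    simp only [tn0, Option.bind_some]
    cases hrow : PySem.List.pyGet? warehouse (r0 + 2 * k * dr) with
    | none => rfl
    | some row =>
      simp only [tn1, Option.bind_some]
      cases hv : PySem.List.pyGet? row (c0 + 2 * k * dc) with
      | none => rfl
      | some v =>
        simp only []
        by_cases hv1 : v = "#"
        · rw [if_pos hv1, if_pos hv1]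
        · rw [if_neg hv1, if_neg hv1]
          by_cases hv2 : v = "."
          · rw [if_pos hv2, if_pos hv2]
          · rw [if_neg hv2, if_neg hv2]
            by_cases hv3 : v = "[" ∨ v = "]"
            · rw [if_pos hv3, if_neg (by tauto)]
              have tn0' : PySem.List.pyGet? (List.zipWith (· + ·) (List.zipWith (· + ·) ps direction) direction) 0
                  = some (r0 + 2 * (k + 1 - 1) * dr) := by rw [tn0]; ring_nf
              have tn1' : PySem.List.pyGet? (List.zipWith (· + ·) (List.zipWith (· + ·) ps direction) direction) 1
                  = some (c0 + 2 * (k + 1 - 1) * dc) := by rw [tn1]; ring_nf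
              exact ih (k + 1) _ (by omega) (by omega) tn0' tn1'
            · rw [if_neg hv3, if_pos (by tauto)]

-- ===== VERDICT (by name: the statement is the Claim_ definition above) =====
theorem check_push_horizontally_spec : Claim_equal_check_push_horizontally := by
  intro warehouse push_start direction _ hpre
  unfold Spec_check_push_horizontally
  obtain ⟨h2, hlen, -⟩ := hpre
  have hdl2 : 2 ≤ direction.length := le_trans h2 hlen
  have gps0 : PySem.List.pyGet? push_start (0 : Int) = some (push_start[0]'(by omega)) := by
    simpa using PySem.List.pyGet?_ofNat push_start 0 (by omega)
  have gps1 : PySem.List.pyGet? push_start (1 : Int) = some (push_start[1]'(by omega)) := by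
    simpa using PySem.List.pyGet?_ofNat push_start 1 (by omega)
  have gd0 : PySem.List.pyGet? direction (0 : Int) = some (direction[0]'(by omega)) := by
    simpa using PySem.List.pyGet?_ofNat direction 0 (by omega)
  have gd1 : PySem.List.pyGet? direction (1 : Int) = some (direction[1]'(by omega)) := by
    simpa using PySem.List.pyGet?_ofNat direction 1 (by omega)
  have hps0 : PySem.List.pyGet? push_start 0
      = some (push_start[0]'(by omega) + 2 * ((1 : Int) - 1) * direction[0]'(by omega)) := by
    rw [gps0]; ring_nf
  have hps1 : PySem.List.pyGet? push_start 1
      = some (push_start[1]'(by omega) + 2 * ((1 : Int) - 1) * direction[1]'(by omega)) := by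
    rw [gps1]; ring_nf
  have h := go_eq warehouse direction (push_start[0]'(by omega)) (push_start[1]'(by omega))
    (direction[0]'(by omega)) (direction[1]'(by omega)) gd0 gd1
    ((warehouse.map List.length).sum + warehouse.length + 2) 1 push_start h2 hlen hps0 hps1
  rw [check_push_horizontally, h]
  rw [check_push_horizontally_alt]
  simp only [gps0, gps1, gd0, gd1]
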